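-- pv_equiv track=rewrite | github.com/jeffyun3061/sales-ai-agent-sdk | scout_agent/services/openai_service.py | _prepare_pdf_analysis_info
-- ===== SOURCE A (Python) =====
-- def _prepare_pdf_analysis_info(pdf_analyses):
--     """
--     PDF 분석 결과를 프롬프트에 포함할 수 있는 형태로 가공합니다.
--     """
--     if not pdf_analyses:
--         return ""
--
--     # 여러 PDF 분석 결과를 통합
--     combined_info = {}
--
--     for analysis in pdf_analyses:
--         for key, value in analysis.items():
--             if value and key not in combined_info:
--                 combined_info[key] = value
--
--     # 프롬프트에 추가할 정보 구성
--     additional_info = "\nPDF 분석에서 추출한 추가 정보:\n"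
--
--     if 'company_description' in combined_info:
--         additional_info += f"- 회사 설명: {combined_info['company_description']}\n"
--
--     if 'products_services' in combined_info:
--         additional_info += f"- 주요 제품/서비스: {combined_info['products_services']}\n"
--
--     if 'target_customers' in combined_info:
--         additional_info += f"- 주요 고객층: {combined_info['target_customers']}\n"
--
--     if 'competitors' in combined_info:
--         additional_info += f"- 주요 경쟁사: {combined_info['competitors']}\n"
--
--     if 'strengths' in combined_info:
--         additional_info += f"- 회사 강점: {combined_info['strengths']}\n"
--
--     if 'business_model' in combined_info:
--         additional_info += f"- 비즈니스 모델: {combined_info['business_model']}\n"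
--
--     return additional_info
-- ===== SOURCE B (Python) =====
-- def _prepare_pdf_analysis_info(pdf_analyses):
--     if not pdf_analyses:
--         return ""
--
--     fields = [
--         ("company_description", "- 회사 설명: "),
--         ("products_services", "- 주요 제품/서비스: "),
--         ("target_customers", "- 주요 고객층: "),
--         ("competitors", "- 주요 경쟁사: "),
--         ("strengths", "- 회사 강점: "),
--         ("business_model", "- 비즈니스 모델: "),
--     ]
--
--     info = "\nPDF 분석에서 추출한 추가 정보:\n"
--     for key, prefix in fields:
--         # first truthy value for this key across the analyses, in order
--         value = next((v for a in pdf_analyses for k, v in a.items() if k == key and v), None)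
--         if value is not None:
--             info += prefix + value + "\n"
--     return info
-- ===== Notes on version B (the rewrite author's own statement) =====
-- stated objective: simpler
-- what changed: Drops the merge-into-combined_info dict and the six separate membership checks: B loops over a (key, line-prefix) table and, key-major, takes the first truthy value for each key directly from the analyses in order.
import Mathlib
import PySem

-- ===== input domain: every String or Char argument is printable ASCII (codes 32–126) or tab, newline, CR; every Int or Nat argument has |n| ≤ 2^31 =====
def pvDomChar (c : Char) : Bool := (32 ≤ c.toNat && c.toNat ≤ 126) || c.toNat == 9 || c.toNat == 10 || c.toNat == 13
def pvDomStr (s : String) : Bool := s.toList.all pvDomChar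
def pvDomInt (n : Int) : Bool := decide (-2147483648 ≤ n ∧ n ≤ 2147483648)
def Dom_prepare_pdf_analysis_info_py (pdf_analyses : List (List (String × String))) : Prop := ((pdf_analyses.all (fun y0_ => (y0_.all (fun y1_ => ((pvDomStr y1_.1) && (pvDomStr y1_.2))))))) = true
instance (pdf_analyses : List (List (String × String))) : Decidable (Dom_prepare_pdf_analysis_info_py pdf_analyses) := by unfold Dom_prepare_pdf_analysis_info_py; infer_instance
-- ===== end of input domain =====

-- B replaces A's merge-then-read (build combined_info, then six membership checks) by a
-- key-major scan over a (key, line-prefix) table: simpler, same result.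

-- ===== PORT A =====
-- the merge loop: 'if value and key not in combined_info: combined_info[key] = value'
def pvMergeStep (d : PySem.Dict String String) (kv : String × String) : PySem.Dict String String :=
  if kv.2 ≠ "" ∧ d.contains kv.1 = false then d.insert kv.1 kv.2 else d

def prepare_pdf_analysis_info_py (pdf_analyses : List (List (String × String))) : String :=
  if pdf_analyses = [] then ""
  else
    let combined := pdf_analyses.foldl (fun d a => a.foldl pvMergeStep d) PySem.Dict.empty
    let i0 := "\nPDF 분석에서 추출한 추가 정보:\n"
    -- combined_info[key] is guarded by 'key in combined_info', so getD "" is exact here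
    let i1 := if combined.contains "company_description" then i0 ++ "- 회사 설명: " ++ combined.getD "company_description" "" ++ "\n" else i0
    let i2 := if combined.contains "products_services" then i1 ++ "- 주요 제품/서비스: " ++ combined.getD "products_services" "" ++ "\n" else i1
    let i3 := if combined.contains "target_customers" then i2 ++ "- 주요 고객층: " ++ combined.getD "target_customers" "" ++ "\n" else i2
    let i4 := if combined.contains "competitors" then i3 ++ "- 주요 경쟁사: " ++ combined.getD "competitors" "" ++ "\n" else i3
    let i5 := if combined.contains "strengths" then i4 ++ "- 회사 강점: " ++ combined.getD "strengths" "" ++ "\n" else i4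
    let i6 := if combined.contains "business_model" then i5 ++ "- 비즈니스 모델: " ++ combined.getD "business_model" "" ++ "\n" else i5
    i6

-- ===== PORT B =====
def pvFields : List (String × String) :=
  [("company_description", "- 회사 설명: "),
   ("products_services", "- 주요 제품/서비스: "),
   ("target_customers", "- 주요 고객층: "),
   ("competitors", "- 주요 경쟁사: "),
   ("strengths", "- 회사 강점: "),
   ("business_model", "- 비즈니스 모델: ")]

-- next((v for a in pdf_analyses for k, v in a.items() if k == key and v), None)
def pvFirstTruthy (pdf_analyses : List (List (String × String))) (key : String) : Option String :=
  pdf_analyses.findSome? (fun a =>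
    a.findSome? (fun kv => if kv.1 = key ∧ kv.2 ≠ "" then some kv.2 else none))

def prepare_pdf_analysis_info_py_alt (pdf_analyses : List (List (String × String))) : String :=
  if pdf_analyses = [] then ""
  else
    pvFields.foldl (fun acc kp =>
      match pvFirstTruthy pdf_analyses kp.1 with
      | some v => acc ++ kp.2 ++ v ++ "\n"
      | none => acc) "\nPDF 분석에서 추출한 추가 정보:\n"

-- ===== PRECONDITION & SPEC =====
def Spec_prepare_pdf_analysis_info_py (pdf_analyses : List (List (String × String))) (out : String) : Prop := out = prepare_pdf_analysis_info_py_alt pdf_analyses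
instance (pdf_analyses : List (List (String × String))) (out : String) : Decidable (Spec_prepare_pdf_analysis_info_py pdf_analyses out) := by unfold Spec_prepare_pdf_analysis_info_py; infer_instance

-- ===== CLAIM (what is proved, stated in full; the proofs are below) =====
def Claim_equal_prepare_pdf_analysis_info_py : Prop := ∀ (pdf_analyses : List (List (String × String))), Dom_prepare_pdf_analysis_info_py pdf_analyses → Spec_prepare_pdf_analysis_info_py pdf_analyses (prepare_pdf_analysis_info_py pdf_analyses)

-- ===== LEMMAS AND PROOFS =====

-- one analysis: what the merge loop leaves at key k is the old binding, else the first truthy pair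
theorem pv_inner (a : List (String × String)) (d : PySem.Dict String String) (k : String) :
    (a.foldl pvMergeStep d).get? k
      = (d.get? k).or (a.findSome? (fun kv => if kv.1 = k ∧ kv.2 ≠ "" then some kv.2 else none)) := by
  induction a generalizing d with
  | nil => simp
  | cons kv rest ih =>
    simp only [List.foldl_cons, List.findSome?_cons, ih]
    unfold pvMergeStep
    by_cases h1 : kv.2 ≠ "" ∧ d.contains kv.1 = false
    · rw [if_pos h1]
      by_cases hk : kv.1 = k
      · subst hk
        have hd : d.get? kv.1 = none := by
          rw [PySem.Dict.get?_eq_none_iff_contains]; exact h1.2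
        simp [PySem.Dict.get?_insert_self, hd, h1.1]
      · rw [PySem.Dict.get?_insert_of_ne _ _ (fun h => hk h.symm)]
        simp [hk]
    · rw [if_neg h1]
      by_cases hk : kv.1 = k
      · subst hk
        rcases not_and_or.mp h1 with hv | hc
        · simp [not_not.mp hv]
        · have : (d.get? kv.1).isSome := by
            rw [← PySem.Dict.contains_eq_isSome_get?]
            simpa using hc
          obtain ⟨w, hw⟩ := Option.isSome_iff_exists.mp this
          simp [hw]
      · simp [hk]

-- whole merge: combined_info.get k = first truthy value for k across the analyses
theorem pv_outer (xs : List (List (String × String))) (d : PySem.Dict String String) (k : String) :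
    ((xs.foldl (fun d a => a.foldl pvMergeStep d) d).get? k)
      = (d.get? k).or (pvFirstTruthy xs k) := by
  induction xs generalizing d with
  | nil => simp [pvFirstTruthy]
  | cons a rest ih =>
    simp only [List.foldl_cons, pvFirstTruthy, List.findSome?_cons] at *
    rw [ih, pv_inner, Option.or_assoc]
    congr 1
    cases List.findSome? (fun kv => if kv.1 = k ∧ kv.2 ≠ "" then some kv.2 else none) a <;> rfl

theorem pv_combined (xs : List (List (String × String))) (k : String) :
    ((xs.foldl (fun d a => a.foldl pvMergeStep d) PySem.Dict.empty).get? k)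
      = pvFirstTruthy xs k := by
  rw [pv_outer]; simp [PySem.Dict.get?_empty]

-- ===== VERDICT (by name: the statement is the Claim_ definition above) =====
theorem prepare_pdf_analysis_info_py_spec : Claim_equal_prepare_pdf_analysis_info_py := by
  intro xs _
  unfold Spec_prepare_pdf_analysis_info_py prepare_pdf_analysis_info_py prepare_pdf_analysis_info_py_alt
  by_cases hne : xs = []
  · simp [hne]
  · simp only [if_neg hne, pvFields, List.foldl_cons, List.foldl_nil]
    simp only [PySem.Dict.contains_eq_isSome_get?, PySem.Dict.getD_eq_get?_getD, pv_combined]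
    cases pvFirstTruthy xs "company_description" <;>
      cases pvFirstTruthy xs "products_services" <;>
      cases pvFirstTruthy xs "target_customers" <;>
      cases pvFirstTruthy xs "competitors" <;>
      cases pvFirstTruthy xs "strengths" <;>
      cases pvFirstTruthy xs "business_model" <;> rfl
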